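-- pv_equiv track=rewrite | github.com/shutpa01/cryptic_solver_v2 | honeypot/app.py | parse_slug
-- ===== SOURCE A (Python) =====
-- def parse_slug(slug):
--     """Extract clue words and answer from slug. Answer is the trailing uppercase segment."""
--     parts = slug.rsplit("-", 1)
--     if len(parts) != 2:
--         return None, None
--     # Walk backwards to find where the uppercase answer starts
--     segments = slug.split("-")
--     # Find the split point: last contiguous uppercase segments
--     answer_parts = []
--     for seg in reversed(segments):
--         if seg == seg.upper() and seg.isalpha():
--             answer_parts.insert(0, seg)
--         else:
--             break
--     if not answer_parts:
--         return None, None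
--     answer = "".join(answer_parts)
--     clue_words = segments[: len(segments) - len(answer_parts)]
--     return " ".join(clue_words), answer
-- ===== SOURCE B (Python) =====
-- def parse_slug(slug):
--     """Extract clue words and answer from slug. Answer is the trailing uppercase segment."""
--     if "-" not in slug:
--         return None, None
--     segments = slug.split("-")
--     # Single forward pass: track the start index of the current run of
--     # all-uppercase alphabetic segments; reset it whenever a segment fails.
--     answer_start = None
--     for i, seg in enumerate(segments):
--         if seg == seg.upper() and seg.isalpha():
--             if answer_start is None:
--                 answer_start = i
--         else:
--             answer_start = None
--     if answer_start is None:
--         return None, None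
--     return " ".join(segments[:answer_start]), "".join(segments[answer_start:])
-- ===== Notes on version B (the rewrite author's own statement) =====
-- stated objective: alternative
-- what changed: Replaces A's reversed walk with insert(0) building the answer-segment list from the back by a single forward enumerate pass that only tracks the start index of the current all-uppercase run, then slices once; the rsplit-based hyphen gate becomes a plain hyphen-membership test.
import Mathlib
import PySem

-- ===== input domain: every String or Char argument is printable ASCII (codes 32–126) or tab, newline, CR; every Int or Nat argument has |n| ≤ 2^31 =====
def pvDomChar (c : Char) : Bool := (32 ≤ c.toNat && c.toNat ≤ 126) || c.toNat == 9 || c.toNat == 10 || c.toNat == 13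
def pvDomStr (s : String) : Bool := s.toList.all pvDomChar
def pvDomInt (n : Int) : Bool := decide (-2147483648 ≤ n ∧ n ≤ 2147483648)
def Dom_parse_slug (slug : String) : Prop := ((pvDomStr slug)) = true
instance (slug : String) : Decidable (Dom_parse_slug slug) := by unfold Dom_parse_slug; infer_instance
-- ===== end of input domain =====

-- B replaces A's backward walk-and-insert with a single forward pass tracking the
-- start of the current all-uppercase run (objective: alternative decomposition).

-- Python's 'seg == seg.upper() and seg.isalpha()' (appears verbatim in both sources)
def segQual (s : String) : Bool := (s == PySem.Str.upper s) && PySem.Str.strIsalpha s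

-- port of the builtin slug.split("-") (separator is non-empty, so split cannot raise)
def pySplitDash (s : String) : List String :=
  (PySem.Chars.splitOn s.toList ['-']).map String.ofList

-- ===== PORT A =====
-- hand port of slug.rsplit("-", 1) (PySem has no rsplit): exact — split at the last
-- occurrence of "-" when present, else the whole string as the single part
def pyRsplitDash1 (s : String) : List String :=
  if PySem.Str.isIn "-" s then
    let i := PySem.Str.rfind s "-"
    [String.ofList (PySem.Chars.slice s.toList none (some i)),
     String.ofList (PySem.Chars.slice s.toList (some (i + 1)) none)]
  else [s]

-- 'for seg in reversed(segments): if qual: answer_parts.insert(0, seg) else: break'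
def loopA : List String → List String → List String
  | [], acc => acc
  | s :: rest, acc => if segQual s then loopA rest (s :: acc) else acc

def parse_slug (slug : String) : Option String × Option String :=
  let parts := pyRsplitDash1 slug
  if parts.length ≠ 2 then (none, none)
  else
    let segments := pySplitDash slug
    let answer_parts := loopA segments.reverse []
    if answer_parts.isEmpty then (none, none)
    else
      (some (PySem.Str.join " " (PySem.List.slice segments none
               (some ((segments.length - answer_parts.length : Nat) : Int)))),
       some (PySem.Str.join "" answer_parts))

-- ===== PORT B =====
-- forward-pass state update: answer_start after one segment
def stepB (st : Option Int) (p : Int × String) : Option Int :=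
  if segQual p.2 then (if st.isNone then some p.1 else st) else none

def parse_slug_alt (slug : String) : Option String × Option String :=
  if !(PySem.Str.isIn "-" slug) then (none, none)
  else
    let segments := pySplitDash slug
    match (PySem.List.enumerate segments).foldl stepB none with
    | none => (none, none)
    | some i =>
        (some (PySem.Str.join " " (PySem.List.slice segments none (some i))),
         some (PySem.Str.join "" (PySem.List.slice segments (some i) none)))

-- ===== PRECONDITION & SPEC =====
def Spec_parse_slug (slug : String) (out : Option String × Option String) : Prop := out = parse_slug_alt slug
instance (slug : String) (out : Option String × Option String) : Decidable (Spec_parse_slug slug out) := by unfold Spec_parse_slug; infer_instance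

-- ===== CLAIM (what is proved, stated in full; the proofs are below) =====
def Claim_equal_parse_slug : Prop := ∀ (slug : String), Dom_parse_slug slug → Spec_parse_slug slug (parse_slug slug)

-- ===== LEMMAS AND PROOFS =====

theorem loopA_eq (l acc : List String) :
    loopA l acc = (l.takeWhile segQual).reverse ++ acc := by
  induction l generalizing acc with
  | nil => simp [loopA]
  | cons s rest ih =>
    by_cases h : segQual s = true <;> simp [loopA, h, ih]

theorem takeWhile_len_le (l : List String) :
    (l.reverse.takeWhile segQual).length ≤ l.length := by
  have := (List.takeWhile_prefix (p := segQual) (l := l.reverse)).length_le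
  simpa using this

theorem foldlB_eq (l : List String) :
    (PySem.List.enumerate l).foldl stepB none =
      (if (l.reverse.takeWhile segQual).length = 0 then none
       else some ((l.length : Int) - (l.reverse.takeWhile segQual).length)) := by
  induction l using List.reverseRecOn with
  | nil => simp
  | append_singleton l x ih =>
    rw [PySem.List.enumerate_append, List.foldl_append, ih]
    simp only [PySem.List.enumerate_cons, PySem.List.enumerate_nil, List.foldl_cons,
      List.foldl_nil, List.reverse_append, List.reverse_cons, List.reverse_nil,
      List.nil_append, List.singleton_append, List.takeWhile_cons,
      List.length_append, List.length_cons, List.length_nil]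
    by_cases hx : segQual x = true
    · have hle := takeWhile_len_le l
      by_cases hr : (l.reverse.takeWhile segQual).length = 0
      · simp [hx, hr, stepB]
      · rw [if_neg hr]
        simp only [hx, if_true, List.length_cons]
        rw [if_neg (by omega)]
        simp only [stepB, hx, if_true, Option.isNone_some, Bool.false_eq_true, if_false]
        congr 1
        push_cast
        ring
    · simp [hx, stepB]

theorem drop_eq_rev_takeWhile (l : List String) :
    l.drop (l.length - (l.reverse.takeWhile segQual).length) =
      (l.reverse.takeWhile segQual).reverse := by
  obtain ⟨t, ht⟩ := List.takeWhile_prefix (p := segQual) (l := l.reverse)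
  have hl : l = t.reverse ++ (l.reverse.takeWhile segQual).reverse := by
    have := congrArg List.reverse ht
    simpa using this.symm
  have hlen : l.length - (l.reverse.takeWhile segQual).length = t.length := by
    have := congrArg List.length ht
    simp at this
    omega
  rw [hlen]
  conv_lhs => rw [hl]
  rw [show t.length = t.reverse.length by simp, List.drop_left]

theorem parse_slug_spec : Claim_equal_parse_slug := by
  intro slug _
  unfold Spec_parse_slug parse_slug parse_slug_alt pyRsplitDash1
  by_cases h : PySem.Str.isIn "-" slug = true
  · simp only [h, if_true, Bool.not_true, Bool.false_eq_true, if_false]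
    simp only [List.length_cons, List.length_nil]
    rw [if_neg (by decide)]
    set segs := pySplitDash slug with hsegs
    rw [foldlB_eq, loopA_eq, List.append_nil]
    by_cases hr : (segs.reverse.takeWhile segQual).length = 0
    · have hnil : segs.reverse.takeWhile segQual = [] := List.length_eq_zero_iff.mp hr
      simp [hnil]
    · have hle := takeWhile_len_le segs
      rw [if_neg hr]
      have hne : ¬ (((segs.reverse.takeWhile segQual).reverse).isEmpty = true) := by
        simp only [List.isEmpty_iff, List.reverse_eq_nil_iff]
        exact fun h' => hr (by simp [h'])
      rw [if_neg hne]
      simp only [List.length_reverse]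
      have hcast : (segs.length : Int) - (segs.reverse.takeWhile segQual).length
          = ((segs.length - (segs.reverse.takeWhile segQual).length : Nat) : Int) := by
        omega
      rw [hcast, PySem.List.slice_to_natCast,
        PySem.List.slice_from_natCast, drop_eq_rev_takeWhile]
  · simp only [Bool.not_eq_true] at h
    have h' : PySem.Chars.isIn ['-'] slug.toList = false := by simpa using h
    simp [h']
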